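-- pv_equiv track=rewrite | github.com/PhishersOfMen/Assn1-cryptography | columnTransposeDecrypt.py | keyPosition
-- ===== SOURCE A (Python) =====
-- def keyPosition(key):
--     position = []
--     for index, i in enumerate(key):
--         previousLetters = key[:index]
--         temp = 1
--         for indexMinusOne, h in enumerate(previousLetters):
--             if h > i:
--                 position[indexMinusOne] += 1
--             else:
--                 temp += 1
--         position.append(temp)
--     return position
-- ===== SOURCE B (Python) =====
-- def keyPosition(key):
--     n = len(key)
--     order = sorted(range(n), key=lambda i: key[i])  # stable: ties keep index order
--     position = [0] * n
--     for rank, i in enumerate(order):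
--         position[i] = rank + 1
--     return position
-- ===== Notes on version B (the rewrite author's own statement) =====
-- stated objective: faster
-- what changed: Replaces the quadratic nested scan (which increments earlier ranks as later letters arrive) by a stable sort of the indices by character followed by a single pass assigning sequential ranks.
import Mathlib
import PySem

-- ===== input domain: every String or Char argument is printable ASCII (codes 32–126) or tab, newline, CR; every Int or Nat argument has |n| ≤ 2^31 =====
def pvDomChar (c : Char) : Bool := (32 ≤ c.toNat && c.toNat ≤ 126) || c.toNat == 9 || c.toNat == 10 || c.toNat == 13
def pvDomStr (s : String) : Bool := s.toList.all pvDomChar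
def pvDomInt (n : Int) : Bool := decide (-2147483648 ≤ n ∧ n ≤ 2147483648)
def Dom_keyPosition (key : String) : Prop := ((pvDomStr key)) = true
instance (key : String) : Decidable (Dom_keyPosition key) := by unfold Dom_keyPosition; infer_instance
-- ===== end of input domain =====

-- B replaces A's quadratic nested scan by a stable sort of the indices by character plus one rank-assignment pass (objective: faster).

-- ===== PORT A =====
-- literal port of A: outer loop over enumerate(key), inner loop over enumerate(key[:index])
-- mutating earlier entries (position[indexMinusOne] += 1) and counting temp, then append.
def keyPosition (key : String) : List Int :=
  (PySem.List.enumerate key.toList 0).foldl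
    (fun position p =>
      let previousLetters := PySem.List.slice key.toList none (some p.1)
      let st :=
        (PySem.List.enumerate previousLetters 0).foldl
          (fun (st : List Int × Int) q =>
            if q.2 > p.2 then
              (PySem.List.pySetD st.1 q.1 (PySem.List.pyGetD st.1 q.1 0 + 1), st.2)
            else
              (st.1, st.2 + 1))
          (position, 1)
      st.1 ++ [st.2])
    []

-- ===== PORT B =====
-- literal port of Source B: order = sorted(range(n), key=lambda i: key[i]) (stable sort), then
-- position[i] = rank + 1 in one pass over enumerate(order).
-- key[i] is ported as pyGetD with default ' ': exact, since every i in range(n) is in range.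
def keyPosition_alt (key : String) : List Int :=
  let cs := key.toList
  let n : Int := cs.length
  let order := PySem.List.sorted (PySem.List.pyRange 0 n) (fun i => PySem.List.pyGetD cs i ' ')
  (PySem.List.enumerate order 0).foldl
    (fun position p => PySem.List.pySetD position p.2 (p.1 + 1))
    (PySem.List.pyRepeat [(0 : Int)] n)

-- ===== PRECONDITION & SPEC =====
def Spec_keyPosition (key : String) (out : List Int) : Prop := out = keyPosition_alt key
instance (key : String) (out : List Int) : Decidable (Spec_keyPosition key out) := by unfold Spec_keyPosition; infer_instance

-- ===== CLAIM (what is proved, stated in full; the proofs are below) =====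
def Claim_equal_keyPosition : Prop := ∀ (key : String), Dom_keyPosition key → Spec_keyPosition key (keyPosition key)

-- ===== LEMMAS AND PROOFS =====

-- ==== shared target ====

def pvQ (cs : List Char) (j k : Nat) : Bool :=
  (decide (k < j) && decide (cs.getD k ' ' ≤ cs.getD j ' ')) ||
  (decide (j < k) && decide (cs.getD k ' ' < cs.getD j ' '))

def pvVal (cs : List Char) (m j : Nat) : Int :=
  1 + ((List.range m).countP (pvQ cs j) : Int)

def pvA (cs : List Char) (m : Nat) : List Int :=
  (List.range m).map (pvVal cs m)

-- ==== generic helpers ====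

theorem pvRange_eq (n : Nat) : ∀ (a : Int),
    PySem.List.pyRange a (a + n) = (List.range n).map (fun (k : Nat) => a + (k : Int)) := by
  induction n with
  | zero =>
      intro a
      rw [show a + ((0 : Nat) : Int) = a by simp]
      rw [PySem.List.pyRange_one_eq_nil le_rfl]
      simp
  | succ m ih =>
      intro a
      rw [PySem.List.pyRange_one_cons (by omega)]
      have h1 : a + ((m + 1 : Nat) : Int) = (a + 1) + (m : Nat) := by push_cast; ring
      rw [h1, ih (a + 1), List.range_succ_eq_map]
      simp only [List.map_cons, List.map_map, Nat.cast_zero, add_zero]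
      congr 1
      apply List.map_congr_left
      intro k _
      simp only [Function.comp_apply]
      push_cast
      ring
theorem pvRange0 (n : Nat) :
    PySem.List.pyRange 0 (n : Int) = (List.range n).map (fun (k : Nat) => (k : Int)) := by
  have h := pvRange_eq n 0
  rw [show (0:Int) + (n:Int) = (n:Int) by ring] at h
  rw [h]
  simp

-- ==== A side: inner loop ====

def pvBump (c : Char) (prev : List Char) (s : Int) (pos : List Int) : List Int :=
  match prev with
  | [] => pos
  | h :: tl =>
      pvBump c tl (s + 1)
        (if c < h then PySem.List.pySetD pos s (PySem.List.pyGetD pos s 0 + 1) else pos)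

theorem pvInner (prev : List Char) (c : Char) : ∀ (s : Int) (pos : List Int) (t : Int),
    (PySem.List.enumerate prev s).foldl
      (fun (st : List Int × Int) q =>
        if q.2 > c then
          (PySem.List.pySetD st.1 q.1 (PySem.List.pyGetD st.1 q.1 0 + 1), st.2)
        else
          (st.1, st.2 + 1))
      (pos, t)
    = (pvBump c prev s pos, t + (prev.countP (fun h => !decide (c < h)) : Int)) := by
  induction prev with
  | nil => intro s pos t; simp [PySem.List.enumerate, pvBump]
  | cons h tl ih =>
      intro s pos t
      rw [PySem.List.enumerate_cons]
      simp only [List.foldl_cons]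
      by_cases hc : c < h
      · rw [if_pos hc, ih]
        simp [pvBump, hc]
      · rw [if_neg hc, ih]
        simp only [pvBump, if_neg hc, List.countP_cons]
        have hd : (!decide (c < h)) = true := by simpa using hc
        rw [hd]
        refine Prod.ext rfl ?_
        simp only
        push_cast
        ring

theorem pvBump_length (c : Char) (prev : List Char) : ∀ (s : Int) (pos : List Int),
    (pvBump c prev s pos).length = pos.length := by
  induction prev with
  | nil => intro s pos; rfl
  | cons h tl ih =>
      intro s pos
      simp only [pvBump]
      rw [ih]
      split <;> simp [PySem.List.length_pySetD]

theorem pvBump_getD (c : Char) (prev : List Char) : ∀ (s : Nat) (pos : List Int),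
    s + prev.length ≤ pos.length → ∀ (j : Nat),
    (pvBump c prev (s : Int) pos).getD j 0 =
      pos.getD j 0 + (if s ≤ j ∧ j < s + prev.length ∧ c < prev.getD (j - s) ' ' then 1 else 0) := by
  induction prev with
  | nil =>
      intro s pos _ j
      simp only [pvBump, List.length_nil]
      rw [if_neg (by omega)]
      ring
  | cons h tl ih =>
      intro s pos hlen j
      simp only [List.length_cons] at hlen
      have hsp : s < pos.length := by omega
      simp only [pvBump]
      have hs1 : (s : Int) + 1 = ((s + 1 : Nat) : Int) := by push_cast; ring
      set pos' := (if c < h then PySem.List.pySetD pos (s : Int) (PySem.List.pyGetD pos (s : Int) 0 + 1) else pos) with hpos'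
      have hlen' : pos'.length = pos.length := by
        rw [hpos']; split <;> simp
      rw [hs1, ih (s + 1) pos' (by rw [hlen']; omega) j]
      by_cases hjs : j = s
      · subst hjs
        rw [if_neg (by omega)]
        by_cases hch : c < h
        · have hg : pos'.getD j 0 = pos.getD j 0 + 1 := by
            rw [hpos', if_pos hch, PySem.List.pySetD_of_nonneg _ _ (by positivity),
                PySem.List.pyGetD_natCast]
            simp only [Int.toNat_natCast]
            rw [List.getD_eq_getElem?_getD, List.getElem?_set_self hsp]
            simp [List.getD_eq_getElem?_getD]
          rw [hg, if_pos ⟨le_refl _, by simp only [List.length_cons]; omega,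
              by simpa using hch⟩]
          omega
        · have hg : pos'.getD j 0 = pos.getD j 0 := by rw [hpos', if_neg hch]
          rw [hg, if_neg (by rintro ⟨_, _, hx⟩; simp at hx; exact hch hx)]
      · have hg : pos'.getD j 0 = pos.getD j 0 := by
          rw [hpos']
          split
          · rw [PySem.List.pySetD_of_nonneg _ _ (by positivity)]
            simp only [Int.toNat_natCast]
            rw [List.getD_eq_getElem?_getD, List.getElem?_set_ne (by omega),
                ← List.getD_eq_getElem?_getD]
          · rfl
        rw [hg]
        congr 1
        by_cases hle : s + 1 ≤ j
        · have h2 : j - s = (j - (s + 1)) + 1 := by omega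
          rw [h2, List.getD_cons_succ]
          refine if_congr ?_ rfl rfl
          simp only [List.length_cons]
          constructor
          · rintro ⟨_, hb, hx⟩; exact ⟨by omega, by omega, hx⟩
          · rintro ⟨_, hb, hx⟩; exact ⟨by omega, by omega, hx⟩
        · rw [if_neg (by rintro ⟨ha, _, _⟩; omega),
              if_neg (by rintro ⟨ha, _, _⟩; omega)]

-- take as a map over range
theorem pvTake_map (cs : List Char) : ∀ (m : Nat), m ≤ cs.length →
    cs.take m = (List.range m).map (fun k => cs.getD k ' ') := by
  intro m
  induction m with
  | zero => intro _; simp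
  | succ m ih =>
      intro hm
      rw [List.take_add_one, List.range_succ, List.map_append, ih (by omega)]
      congr 1
      have : m < cs.length := by omega
      simp [List.getElem?_eq_getElem this]

-- ==== B side: stable sort ====

def pvKeyf (cs : List Char) (i : Int) : Char := PySem.List.pyGetD cs i ' '

def pvLex (cs : List Char) (a b : Int) : Prop :=
  pvKeyf cs a < pvKeyf cs b ∨ (pvKeyf cs a = pvKeyf cs b ∧ a < b)

def pvLexb (cs : List Char) (a b : Int) : Bool :=
  decide (pvKeyf cs a < pvKeyf cs b) || (decide (pvKeyf cs a = pvKeyf cs b) && decide (a < b))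

theorem pvLexb_iff (cs : List Char) (a b : Int) : pvLexb cs a b = true ↔ pvLex cs a b := by
  simp [pvLexb, pvLex]

theorem pvLex_asymm (cs : List Char) {a b : Int} (h : pvLex cs a b) : ¬ pvLex cs b a := by
  rcases h with h | ⟨h1, h2⟩
  · rintro (h' | ⟨h1', _⟩)
    · exact absurd h' (not_lt_of_gt h)
    · exact absurd h1' (ne_of_gt h)
  · rintro (h' | ⟨_, h2'⟩)
    · exact absurd h' (by simp [h1])
    · omega

theorem pvLex_irrefl (cs : List Char) (a : Int) : ¬ pvLex cs a a := by
  rintro (h | ⟨_, h⟩)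
  · simp at h
  · omega

theorem pvInsertBy_nil {α : Type} (bf : α → α → Bool) (x : α) :
    PySem.List.insertBy bf x [] = [x] := rfl

theorem pvInsertBy_cons {α : Type} (bf : α → α → Bool) (x y : α) (ys : List α) :
    PySem.List.insertBy bf x (y :: ys) =
      if bf x y then x :: y :: ys else y :: PySem.List.insertBy bf x ys := rfl

theorem pvIns_pairwise (cs : List Char) (x : Int) : ∀ (acc : List Int),
    acc.Pairwise (pvLex cs) → (∀ y ∈ acc, y < x) →
    (PySem.List.insertBy (fun a b => decide (pvKeyf cs a < pvKeyf cs b)) x acc).Pairwise (pvLex cs) := by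
  intro acc
  induction acc with
  | nil => intro _ _; simp [pvInsertBy_nil]
  | cons y ys ih =>
      intro hp hlt
      rw [pvInsertBy_cons]
      rcases List.pairwise_cons.mp hp with ⟨hy, hys⟩
      split
      next hb =>
        have hxy : pvKeyf cs x < pvKeyf cs y := by simpa using hb
        refine List.pairwise_cons.mpr ⟨?_, hp⟩
        intro z hz
        rcases hz with _ | hz'
        · exact Or.inl hxy
        · rename_i hz'
          have := hy _ hz'
          rcases this with h | ⟨h1, _⟩
          · exact Or.inl (lt_trans hxy h)
          · exact Or.inl (h1 ▸ hxy)
      next hb =>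
        have hyx : pvKeyf cs y ≤ pvKeyf cs x := by simpa using hb
        refine List.pairwise_cons.mpr ⟨?_, ih hys (fun z hz => hlt z (by simp [hz]))⟩
        intro z hz
        rcases (PySem.List.mem_insertBy _ _ _ _).mp hz with rfl | hz'
        · rcases eq_or_lt_of_le hyx with h | h
          · exact Or.inr ⟨h, hlt y (by simp)⟩
          · exact Or.inl h
        · exact hy _ hz'

theorem pvFold_pairwise (cs : List Char) : ∀ (xs acc : List Int),
    xs.Pairwise (· < ·) → acc.Pairwise (pvLex cs) → (∀ y ∈ acc, ∀ x ∈ xs, y < x) →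
    (xs.foldl (fun acc x => PySem.List.insertBy (fun a b => decide (pvKeyf cs a < pvKeyf cs b)) x acc) acc).Pairwise (pvLex cs) := by
  intro xs
  induction xs with
  | nil => intro acc _ h _; simpa using h
  | cons x tl ih =>
      intro acc hxs hacc hcross
      rcases List.pairwise_cons.mp hxs with ⟨hx, htl⟩
      simp only [List.foldl_cons]
      apply ih _ htl
      · exact pvIns_pairwise cs x acc hacc (fun y hy => hcross y hy x (by simp))
      · intro y hy z hz
        rcases (PySem.List.mem_insertBy _ _ _ _).mp hy with rfl | hy'
        · exact hx _ hz
        · exact hcross y hy' z (by simp [hz])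

theorem pvIdx (cs : List Char) : ∀ (o : List Int),
    o.Pairwise (pvLex cs) → ∀ j ∈ o,
    List.idxOf j o = o.countP (fun k => pvLexb cs k j) := by
  intro o
  induction o with
  | nil => intro _ j hj; simp at hj
  | cons i tl ih =>
      intro hp j hj
      rcases List.pairwise_cons.mp hp with ⟨hi, htl⟩
      by_cases hij : j = i
      · subst hij
        rw [List.idxOf_cons_self, List.countP_cons]
        have h1 : pvLexb cs j j = false := by
          rw [← Bool.not_eq_true]; rw [pvLexb_iff]; exact pvLex_irrefl cs j
        have h2 : tl.countP (fun k => pvLexb cs k j) = 0 := by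
          rw [List.countP_eq_zero]
          intro z hz
          simp only [pvLexb_iff]
          exact pvLex_asymm cs (hi _ hz)
        simp [h1, h2]
      · have hjtl : j ∈ tl := (List.mem_cons.mp hj).resolve_left hij
        rw [List.idxOf_cons_ne _ (fun h => hij h.symm), List.countP_cons]
        have h1 : pvLexb cs i j = true := by rw [pvLexb_iff]; exact hi _ hjtl
        rw [ih htl j hjtl]
        simp [h1]

theorem pvSetFold : ∀ (o : List Int) (s : Int) (pos : List Int), o.Nodup →
    (∀ i ∈ o, 0 ≤ i ∧ i.toNat < pos.length) →
    ((PySem.List.enumerate o s).foldl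
        (fun pos p => PySem.List.pySetD pos p.2 (p.1 + 1)) pos).length = pos.length ∧
    ∀ (j : Nat),
      ((PySem.List.enumerate o s).foldl
        (fun pos p => PySem.List.pySetD pos p.2 (p.1 + 1)) pos).getD j 0 =
        if (j : Int) ∈ o then s + 1 + (List.idxOf (j : Int) o : Int) else pos.getD j 0 := by
  intro o
  induction o with
  | nil => intro s pos _ _; simp [PySem.List.enumerate]
  | cons i tl ih =>
      intro s pos hnd hbnd
      rcases List.nodup_cons.mp hnd with ⟨hitl, hndtl⟩
      rcases hbnd i (by simp) with ⟨hi0, hilen⟩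
      rw [PySem.List.enumerate_cons]
      simp only [List.foldl_cons]
      have hset : PySem.List.pySetD pos i (s + 1) = pos.set i.toNat (s + 1) :=
        PySem.List.pySetD_of_nonneg _ _ hi0
      have hlen' : (pos.set i.toNat (s + 1)).length = pos.length := by simp
      have hbnd' : ∀ z ∈ tl, 0 ≤ z ∧ z.toNat < (pos.set i.toNat (s + 1)).length := by
        intro z hz; rw [hlen']; exact hbnd z (by simp [hz])
      rcases ih (s + 1) (pos.set i.toNat (s + 1)) hndtl hbnd' with ⟨ihlen, ihget⟩
      rw [hset]
      constructor
      · rw [ihlen, hlen']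
      · intro j
        rw [ihget j]
        by_cases hji : (j : Int) = i
        · have hjtl : (j : Int) ∉ tl := hji ▸ hitl
          rw [if_neg hjtl, if_pos (by simp [hji])]
          have h0 : List.idxOf (j : Int) (i :: tl) = 0 := by rw [hji]; exact List.idxOf_cons_self
          rw [h0]
          have hgs : (pos.set i.toNat (s + 1)).getD j 0 = s + 1 := by
            have hjn2 : j = i.toNat := by omega
            rw [List.getD_eq_getElem?_getD, hjn2, List.getElem?_set_self hilen]
            rfl
          rw [hgs]
          simp
        · by_cases hjtl : (j : Int) ∈ tl
          · rw [if_pos hjtl, if_pos (by simp [hjtl])]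
            rw [List.idxOf_cons_ne _ (fun h => hji h.symm)]
            push_cast [Nat.succ_eq_add_one]
            ring
          · rw [if_neg hjtl, if_neg (by simp [hji, hjtl])]
            rw [List.getD_eq_getElem?_getD, List.getElem?_set_ne (by omega), ← List.getD_eq_getElem?_getD]

theorem pvLexb_eq_pvQ (cs : List Char) (j k : Nat) :
    pvLexb cs (k : Int) (j : Int) = pvQ cs j k := by
  have hk : pvKeyf cs (k : Int) = cs.getD k ' ' := by
    simp [pvKeyf, PySem.List.pyGetD_natCast]
  have hj : pvKeyf cs (j : Int) = cs.getD j ' ' := by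
    simp [pvKeyf, PySem.List.pyGetD_natCast]
  have hkj : (decide ((k : Int) < (j : Int))) = decide (k < j) := by simp
  simp only [pvLexb, pvQ, hk, hj]
  rw [hkj]
  by_cases he : k = j
  · subst he
    simp
  · generalize cs.getD k ' ' = x
    generalize cs.getD j ' ' = y
    rcases lt_trichotomy x y with h | h | h
    · by_cases h3 : k < j
      · simp [h, h3, le_of_lt h]
      · simp [h, h3, le_of_lt h, show j < k by omega]
    · simp [h]
    · simp [not_lt_of_gt h, h.ne', not_le.mpr h]

-- B main lemma
theorem pvB (key : String) :
    (keyPosition_alt key).length = key.toList.length ∧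
    ∀ (j : Nat), j < key.toList.length →
      (keyPosition_alt key).getD j 0 = pvVal key.toList key.toList.length j := by
  have hcs : keyPosition_alt key =
      (PySem.List.enumerate
        (PySem.List.sorted (PySem.List.pyRange 0 (key.toList.length : Int))
          (fun i => PySem.List.pyGetD key.toList i ' ')) 0).foldl
        (fun position p => PySem.List.pySetD position p.2 (p.1 + 1))
        (PySem.List.pyRepeat [(0 : Int)] (key.toList.length : Int)) := rfl
  set cs := key.toList with hcsdef
  set n := cs.length with hn
  set R := PySem.List.pyRange 0 (n : Int) with hRdef
  set order := PySem.List.sorted R (fun i => PySem.List.pyGetD cs i ' ') with horder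
  have hRmap : R = (List.range n).map (fun (k : Nat) => (k : Int)) := pvRange0 n
  have hRpair : R.Pairwise (· < ·) := by
    rw [hRmap, List.pairwise_map]
    exact List.pairwise_lt_range.imp (fun h => by exact_mod_cast h)
  have hRnodup : R.Nodup := hRpair.imp (fun h => ne_of_lt h)
  have hperm : order.Perm R := PySem.List.sorted_perm _ _ _
  have hOnodup : order.Nodup := hperm.nodup_iff.mpr hRnodup
  have hmemR : ∀ (i : Int), i ∈ R ↔ 0 ≤ i ∧ i < (n : Int) := by
    intro i
    rw [hRmap]
    simp only [List.mem_map, List.mem_range]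
    constructor
    · rintro ⟨k, hk, rfl⟩; constructor <;> omega
    · rintro ⟨h0, h1⟩
      refine ⟨i.toNat, by omega, by omega⟩
  have hOpair : order.Pairwise (pvLex cs) := by
    rw [horder, PySem.List.sorted_eq_foldl_insertBy]
    exact pvFold_pairwise cs R [] hRpair List.Pairwise.nil (by simp)
  have hpos0 : PySem.List.pyRepeat [(0 : Int)] (n : Int) = List.replicate n (0 : Int) := by
    rw [PySem.List.pyRepeat_singleton]
    simp
  have hbnd : ∀ i ∈ order, 0 ≤ i ∧ i.toNat < (List.replicate n (0 : Int)).length := by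
    intro i hi
    have := (hmemR i).mp (hperm.mem_iff.mp hi)
    constructor
    · exact this.1
    · simp; omega
  rcases pvSetFold order 0 (List.replicate n (0 : Int)) hOnodup hbnd with ⟨hlen, hget⟩
  rw [hcs, hpos0]
  constructor
  · rw [hlen]; simp
  · intro j hj
    rw [hget j]
    have hjO : (j : Int) ∈ order := hperm.mem_iff.mpr ((hmemR _).mpr ⟨by positivity, by omega⟩)
    rw [if_pos hjO]
    rw [pvIdx cs order hOpair _ hjO]
    rw [hperm.countP_eq]
    rw [hRmap, List.countP_map]
    have hc : List.countP ((fun k => pvLexb cs k (j : Int)) ∘ (fun (k : Nat) => (k : Int)))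
        (List.range n) = List.countP (pvQ cs j) (List.range n) := by
      apply List.countP_congr
      intro k _
      simp only [Function.comp_apply, pvLexb_eq_pvQ]
    rw [hc]
    unfold pvVal
    ring

-- A main lemma
theorem pvAstep (key : String) (m : Nat) (hm : m < key.toList.length) :
    (fun position (p : Int × Char) =>
      let previousLetters := PySem.List.slice key.toList none (some p.1)
      let st :=
        (PySem.List.enumerate previousLetters 0).foldl
          (fun (st : List Int × Int) q =>
            if q.2 > p.2 then
              (PySem.List.pySetD st.1 q.1 (PySem.List.pyGetD st.1 q.1 0 + 1), st.2)
            else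
              (st.1, st.2 + 1))
          (position, 1)
      st.1 ++ [st.2])
      (pvA key.toList m) ((m : Int), key.toList.getD m ' ')
    = pvA key.toList (m + 1) := by
  set cs := key.toList with hcs
  set c := cs.getD m ' ' with hc
  simp only
  have hslice : PySem.List.slice cs none (some (m : Int)) = cs.take m := by
    rw [PySem.List.slice_to _ (by positivity)]
    simp
  rw [hslice, pvInner (cs.take m) c 0 (pvA cs m) 1]
  dsimp only
  have hlenA : (pvA cs m).length = m := by simp [pvA]
  have hgetA : ∀ (j : Nat), j < m → (pvA cs m).getD j 0 = pvVal cs m j := by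
    intro j hj
    rw [List.getD_eq_getElem _ _ (by simp [pvA]; omega)]
    simp [pvA]
  have htake : cs.take m = (List.range m).map (fun k => cs.getD k ' ') :=
    pvTake_map cs m (le_of_lt hm)
  have htlen : (cs.take m).length = m := by rw [htake]; simp
  -- the appended rank value
  have hq_mm : pvQ cs m m = false := by simp [pvQ]
  have htemp : (1 : Int) + ((cs.take m).countP (fun h => !decide (c < h)) : Int)
      = pvVal cs (m + 1) m := by
    unfold pvVal
    rw [List.range_succ, List.countP_append]
    have h1 : List.countP (pvQ cs m) [m] = 0 := by simp [hq_mm]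
    rw [h1]
    have h2 : (cs.take m).countP (fun h => !decide (c < h))
        = (List.range m).countP (pvQ cs m) := by
      rw [htake, List.countP_map]
      apply List.countP_congr
      intro k hk
      have hkm : k < m := List.mem_range.mp hk
      have hmk : ¬ (m < k) := by omega
      rw [hc]
      simp [pvQ, hkm, hmk, not_lt]
    rw [h2]
    push_cast
    ring
  -- the bumped prefix
  have hbump : pvBump c (cs.take m) 0 (pvA cs m)
      = (List.range m).map (pvVal cs (m + 1)) := by
    apply List.ext_getElem
    · rw [pvBump_length, hlenA]; simp
    · intro j h1 h2
      have hjm : j < m := by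
        have := h2; simpa using this
      rw [← List.getD_eq_getElem _ 0 h1, ← List.getD_eq_getElem _ 0 h2]
      have hb := pvBump_getD c (cs.take m) 0 (pvA cs m) (by rw [hlenA, htlen]; omega) j
      rw [Nat.cast_zero] at hb
      rw [hb, hgetA j hjm]
      have hgm : ((List.range m).map (pvVal cs (m + 1))).getD j 0 = pvVal cs (m + 1) j := by
        rw [List.getD_eq_getElem _ _ (by simp; omega)]
        simp
      rw [hgm]
      have hcond : (0 ≤ j ∧ j < 0 + (cs.take m).length ∧ c < (cs.take m).getD (j - 0) ' ')
          ↔ (c < cs.getD j ' ') := by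
        rw [htlen]
        constructor
        · rintro ⟨_, _, hx⟩
          rwa [show j - 0 = j by omega, htake, List.getD_eq_getElem _ _ (by simp; omega),
            List.getElem_map, List.getElem_range] at hx
        · intro hx
          refine ⟨by omega, by omega, ?_⟩
          rwa [show j - 0 = j by omega, htake, List.getD_eq_getElem _ _ (by simp; omega),
            List.getElem_map, List.getElem_range]
      rw [if_congr hcond rfl rfl]
      unfold pvVal
      rw [List.range_succ, List.countP_append]
      have hqm : pvQ cs j m = decide (c < cs.getD j ' ') := by
        simp only [pvQ, hc]
        have : ¬ (m < j) := by omega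
        simp [this, hjm]
      have h1 : List.countP (pvQ cs j) [m] = if c < cs.getD j ' ' then 1 else 0 := by
        simp [hqm]
      rw [h1]
      split <;> push_cast <;> ring
  rw [hbump, htemp]
  unfold pvA
  rw [List.range_succ, List.map_append]
  simp

theorem pvAmain (key : String) :
    keyPosition key = pvA key.toList key.toList.length := by
  have hfold : ∀ (m : Nat), m ≤ key.toList.length →
      (PySem.List.enumerate (key.toList.take m) 0).foldl
        (fun position p =>
          let previousLetters := PySem.List.slice key.toList none (some p.1)
          let st :=
            (PySem.List.enumerate previousLetters 0).foldl
              (fun (st : List Int × Int) q =>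
                if q.2 > p.2 then
                  (PySem.List.pySetD st.1 q.1 (PySem.List.pyGetD st.1 q.1 0 + 1), st.2)
                else
                  (st.1, st.2 + 1))
              (position, 1)
          st.1 ++ [st.2])
        [] = pvA key.toList m := by
    intro m
    induction m with
    | zero => intro _; simp [pvA]
    | succ m ih =>
        intro hm
        have hmlt : m < key.toList.length := by omega
        rw [List.take_add_one]
        have hsome : key.toList[m]? = some (key.toList.getD m ' ') := by
          rw [List.getElem?_eq_getElem hmlt, List.getD_eq_getElem _ _ hmlt]
        rw [hsome]
        simp only [Option.toList_some]
        rw [PySem.List.enumerate_append, List.foldl_append, ih (by omega)]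
        have hlt : (key.toList.take m).length = m := by
          rw [List.length_take]; omega
        rw [hlt]
        rw [PySem.List.enumerate_cons]
        simp only [List.foldl_cons, zero_add]
        exact pvAstep key m hmlt
  have h := hfold key.toList.length le_rfl
  rw [List.take_length] at h
  exact h

theorem pvFinal (key : String) : keyPosition key = keyPosition_alt key := by
  rcases pvB key with ⟨hlen, hget⟩
  rw [pvAmain key]
  apply List.ext_getElem
  · rw [hlen]; simp [pvA]
  · intro j h1 h2
    have hjn : j < key.toList.length := by simpa [pvA] using h1
    rw [← List.getD_eq_getElem _ 0 h1, ← List.getD_eq_getElem _ 0 h2]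
    rw [hget j hjn]
    rw [List.getD_eq_getElem _ _ h1]
    simp [pvA]

-- ===== VERDICT (by name: the statement is the Claim_ definition above) =====
theorem keyPosition_spec : Claim_equal_keyPosition := by
  intro key _
  unfold Spec_keyPosition
  exact pvFinal key
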